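-- pv_equiv track=rewrite | github.com/AlvinNgo123/leetcode_practice | isAnagram.py | isAnagramDict
-- ===== SOURCE A (Python) =====
-- def isAnagramDict(s, t):
--     if len(s) != len(t):
--         return False
--
--     inS = {}
--     for i in range(len(s)):
--         if s[i] in inS:
--             inS[s[i]] += 1
--         else:
--             inS[s[i]] = 1
--
--     for i in range(len(t)):
--         if (t[i] in inS) and (inS[t[i]] > 0):
--             inS[t[i]] -= 1
--         else:
--             return False
--
--     for key, value in inS.items():
--         if value > 0:
--             return False
--
--     return True
-- ===== SOURCE B (Python) =====
-- def isAnagramDict(s, t):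
--     return sorted(s) == sorted(t)
-- ===== Notes on version B (the rewrite author's own statement) =====
-- stated objective: simpler
-- what changed: Replaces the three counting passes over a hand-built dict with a single sort-and-compare: sorted(s) == sorted(t).
import Mathlib
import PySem

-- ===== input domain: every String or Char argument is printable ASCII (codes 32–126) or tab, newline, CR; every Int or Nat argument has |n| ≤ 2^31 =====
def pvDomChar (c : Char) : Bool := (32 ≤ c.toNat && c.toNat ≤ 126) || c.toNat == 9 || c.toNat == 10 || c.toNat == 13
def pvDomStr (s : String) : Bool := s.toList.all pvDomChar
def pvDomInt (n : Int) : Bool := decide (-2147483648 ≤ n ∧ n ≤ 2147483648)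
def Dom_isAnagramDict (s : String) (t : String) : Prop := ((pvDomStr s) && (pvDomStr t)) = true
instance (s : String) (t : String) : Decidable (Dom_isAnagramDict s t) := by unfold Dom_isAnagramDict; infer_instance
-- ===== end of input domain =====

-- B replaces A's three counting passes over a hand-built dict with sorted(s) == sorted(t); simpler, return value identical.

-- ===== PORT A =====
-- second loop of A: early 'return False' modelled by an Option accumulator (none = returned False)
def isAnagramDict (s : String) (t : String) : Bool :=
  if PySem.Str.len s ≠ PySem.Str.len t then false
  else
    let inS : PySem.Dict Char Int :=
      (PySem.List.pyRange 0 (PySem.Str.len s) 1).foldl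
        (fun d i =>
          if d.contains (PySem.List.pyGetD s.toList i ' ') then
            d.modify (PySem.List.pyGetD s.toList i ' ') 0 (· + 1)
          else
            d.insert (PySem.List.pyGetD s.toList i ' ') 1)
        PySem.Dict.empty
    match (PySem.List.pyRange 0 (PySem.Str.len t) 1).foldl
        (fun acc i =>
          match acc with
          | none => none
          | some d =>
            if d.contains (PySem.List.pyGetD t.toList i ' ')
                && decide ((0 : Int) < d.getD (PySem.List.pyGetD t.toList i ' ') 0) then
              some (d.modify (PySem.List.pyGetD t.toList i ' ') 0 (· - 1))
            else none)
        (some inS) with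
    | none => false
    | some d => d.items.all (fun kv => !(decide ((0 : Int) < kv.2)))

-- ===== PORT B =====
def isAnagramDict_alt (s : String) (t : String) : Bool :=
  PySem.List.sorted s.toList (fun x => x) false == PySem.List.sorted t.toList (fun x => x) false

-- ===== PRECONDITION & SPEC =====
def Spec_isAnagramDict (s : String) (t : String) (out : Bool) : Prop := out = isAnagramDict_alt s t
instance (s : String) (t : String) (out : Bool) : Decidable (Spec_isAnagramDict s t out) := by unfold Spec_isAnagramDict; infer_instance

-- ===== CLAIM (what is proved, stated in full; the proofs are below) =====
def Claim_equal_isAnagramDict : Prop := ∀ (s : String) (t : String), Dom_isAnagramDict s t → Spec_isAnagramDict s t (isAnagramDict s t)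

-- ===== LEMMAS AND PROOFS =====

lemma stepA_eq (d : PySem.Dict Char Int) (c : Char) :
    (if d.contains c then d.modify c 0 (· + 1) else d.insert c 1) = d.modify c 0 (· + 1) := by
  by_cases h : d.contains c
  · simp [h]
  · have h2 : d.get? c = none := (PySem.Dict.get?_eq_none_iff_contains d c).mpr (by simpa using h)
    simp [PySem.Dict.modify, PySem.Dict.getD, h, h2]

lemma firstLoop_eq (l : List Char) :
    l.foldl (fun d c => if d.contains c then d.modify c 0 (· + 1) else d.insert c 1)
      PySem.Dict.empty = PySem.Dict.counter l := by
  rw [PySem.Dict.counter_eq_foldl]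
  congr 1
  funext d c
  exact stepA_eq d c

lemma getD_foldl_modify_sub (l : List Char) (d : PySem.Dict Char Int) (v : Char) :
    (l.foldl (fun d c => d.modify c 0 (· - 1)) d).getD v 0 = d.getD v 0 - l.count v := by
  induction l generalizing d with
  | nil => simp
  | cons c rest ih =>
    simp only [List.foldl_cons, ih, PySem.Dict.getD_modify, List.count_cons]
    by_cases h : v = c
    · simp [h]; push_cast; ring
    · simp [Ne.symm h, fun hh => h (by simpa using hh)]

def step2 (acc : Option (PySem.Dict Char Int)) (c : Char) : Option (PySem.Dict Char Int) :=
  match acc with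
  | none => none
  | some d =>
    if d.contains c && decide ((0 : Int) < d.getD c 0) then
      some (d.modify c 0 (· - 1))
    else none

lemma foldl_step2_none (l : List Char) : l.foldl step2 none = none := by
  induction l with
  | nil => rfl
  | cons c rest ih => simpa [step2] using ih

lemma secondLoop_eq (l : List Char) (d : PySem.Dict Char Int) :
    l.foldl step2 (some d)
    = if ∀ c ∈ l, (l.count c : Int) ≤ d.getD c 0 then
        some (l.foldl (fun d c => d.modify c 0 (· - 1)) d)
      else none := by
  induction l generalizing d with
  | nil => simp
  | cons c rest ih =>
    have hcond : (d.contains c && decide ((0 : Int) < d.getD c 0)) = decide ((0 : Int) < d.getD c 0) := by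
      by_cases h : d.contains c
      · simp [h]
      · have h0 : d.getD c 0 = 0 := by
          have h2 : d.get? c = none := (PySem.Dict.get?_eq_none_iff_contains d c).mpr (by simpa using h)
          simp [PySem.Dict.getD_eq_get?_getD, h2]
        simp [h, h0]
    rw [List.foldl_cons]
    show List.foldl step2 (step2 (some d) c) rest = _
    rw [show step2 (some d) c = if d.contains c && decide ((0 : Int) < d.getD c 0) then
          some (d.modify c 0 (· - 1)) else none from rfl, hcond]
    by_cases hpos : (0 : Int) < d.getD c 0
    · rw [if_pos (by simpa using hpos), ih]
      have hiff : (∀ x ∈ rest, (rest.count x : Int) ≤ (d.modify c 0 (· - 1)).getD x 0)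
          ↔ (∀ x ∈ c :: rest, ((c :: rest).count x : Int) ≤ d.getD x 0) := by
        constructor
        · intro hall x hx
          rcases List.mem_cons.mp hx with h1 | h1
          · subst h1
            by_cases hmem : x ∈ rest
            · have := hall x hmem
              rw [PySem.Dict.getD_modify, if_pos rfl] at this
              simp only [List.count_cons_self]
              push_cast at this ⊢
              omega
            · rw [List.count_cons_self, List.count_eq_zero_of_not_mem hmem]
              push_cast
              omega
          · have := hall x h1
            rw [PySem.Dict.getD_modify] at this
            by_cases hxc : x = c
            · subst hxc
              rw [if_pos rfl] at this
              rw [List.count_cons_self]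
              push_cast at this ⊢
              omega
            · rw [if_neg hxc] at this
              simp only [List.count_cons, beq_iff_eq, if_neg (Ne.symm hxc)]
              simpa using this
        · intro hall x hx
          rw [PySem.Dict.getD_modify]
          by_cases hxc : x = c
          · subst hxc
            have := hall x (by simp)
            rw [List.count_cons_self] at this
            rw [if_pos rfl]
            push_cast at this ⊢
            omega
          · rw [if_neg hxc]
            have := hall x (by simp [hx])
            simp only [List.count_cons, beq_iff_eq, if_neg (Ne.symm hxc)] at this
            simpa using this
      rw [List.foldl_cons]
      by_cases hc : ∀ x ∈ c :: rest, ((c :: rest).count x : Int) ≤ d.getD x 0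
      · rw [if_pos (hiff.mpr hc), if_pos hc]
      · rw [if_neg (fun hh => hc (hiff.mp hh)), if_neg hc]
    · rw [if_neg (by simpa using hpos), foldl_step2_none]
      have hfail : ¬ ∀ x ∈ c :: rest, ((c :: rest).count x : Int) ≤ d.getD x 0 := by
        intro hall
        have := hall c (by simp)
        simp only [List.count_cons_self] at this
        push_cast at this
        omega
      rw [if_neg hfail]

lemma count_iff (sl tl : List Char) :
    ((∀ c ∈ tl, (tl.count c : Int) ≤ (sl.count c : Int)) ∧
     (∀ k, (k ∈ sl ∨ k ∈ tl) → ¬ ((0 : Int) < (sl.count k : Int) - (tl.count k : Int))))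
    ↔ sl.Perm tl := by
  rw [List.perm_iff_count]
  constructor
  · rintro ⟨h1, h2⟩ a
    by_cases ha : a ∈ tl
    · have := h1 a ha
      have := h2 a (Or.inr ha)
      omega
    · have h0 : tl.count a = 0 := List.count_eq_zero_of_not_mem ha
      by_cases hs : a ∈ sl
      · have := h2 a (Or.inl hs)
        omega
      · simp [h0, List.count_eq_zero_of_not_mem hs]
  · intro h
    refine ⟨fun c _ => by rw [h c], fun k _ => by rw [h k]; omega⟩

lemma A_eq_decide_perm (s t : String) :
    isAnagramDict s t = decide (s.toList.Perm t.toList) := by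
  unfold isAnagramDict
  by_cases hlen : PySem.Str.len s = PySem.Str.len t
  · rw [if_neg (by simpa using hlen)]
    have e1 : (PySem.List.pyRange 0 (PySem.Str.len s) 1).foldl
        (fun d i =>
          if d.contains (PySem.List.pyGetD s.toList i ' ') then
            d.modify (PySem.List.pyGetD s.toList i ' ') 0 (· + 1)
          else
            d.insert (PySem.List.pyGetD s.toList i ' ') 1)
        PySem.Dict.empty = PySem.Dict.counter s.toList := by
      rw [show PySem.Str.len s = ((s.toList.length : Nat) : Int) from rfl]
      exact (PySem.List.foldl_pyRange_zero_pyGetD' s.toList ' '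
        (fun (d : PySem.Dict Char Int) (c : Char) =>
          if d.contains c then d.modify c 0 (· + 1) else d.insert c 1)
        PySem.Dict.empty).trans (firstLoop_eq s.toList)
    simp only [e1]
    have e2 : (PySem.List.pyRange 0 (PySem.Str.len t) 1).foldl
        (fun acc i =>
          match acc with
          | none => none
          | some d =>
            if d.contains (PySem.List.pyGetD t.toList i ' ')
                && decide ((0 : Int) < d.getD (PySem.List.pyGetD t.toList i ' ') 0) then
              some (d.modify (PySem.List.pyGetD t.toList i ' ') 0 (· - 1))
            else none)
        (some (PySem.Dict.counter s.toList))
      = if ∀ c ∈ t.toList, (t.toList.count c : Int) ≤ (PySem.Dict.counter s.toList).getD c 0 then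
          some (t.toList.foldl (fun d c => d.modify c 0 (· - 1)) (PySem.Dict.counter s.toList))
        else none := by
      rw [show PySem.Str.len t = ((t.toList.length : Nat) : Int) from rfl]
      exact (PySem.List.foldl_pyRange_zero_pyGetD' t.toList ' ' step2
        (some (PySem.Dict.counter s.toList))).trans
        (secondLoop_eq t.toList (PySem.Dict.counter s.toList))
    simp only [e2]
    by_cases hle : ∀ c ∈ t.toList, (t.toList.count c : Int) ≤ (PySem.Dict.counter s.toList).getD c 0
    · rw [if_pos hle]
      set D := t.toList.foldl (fun d c => d.modify c 0 (· - 1)) (PySem.Dict.counter s.toList) with hD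
      have hkeys : D.keys = PySem.Set.update (PySem.Set.ofList s.toList) t.toList := by
        rw [hD, PySem.Dict.keys_foldl_modify t.toList 0 (fun _ _ => (· - 1)), PySem.Dict.keys_counter]
      have hnd : D.keys.Nodup := by
        rw [hkeys]
        exact PySem.Set.nodup_update _ _ (PySem.Set.nodup_ofList s.toList)
      have hgD : ∀ k, D.getD k 0 = (s.toList.count k : Int) - t.toList.count k := by
        intro k
        rw [hD, getD_foldl_modify_sub, PySem.Dict.getD_counter]
      show D.items.all (fun kv => !(decide ((0 : Int) < kv.2))) = _
      rw [PySem.Dict.items_eq_map_keys D hnd 0, List.all_map]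
      have hmemk : ∀ k, k ∈ D.keys ↔ (k ∈ s.toList ∨ k ∈ t.toList) := by
        intro k
        rw [hkeys, PySem.Set.mem_update, PySem.Set.mem_ofList]
      have hiff2 : (∀ k ∈ D.keys, ¬ ((0 : Int) < D.getD k 0)) ↔ s.toList.Perm t.toList := by
        rw [← count_iff s.toList t.toList]
        constructor
        · intro h
          refine ⟨fun c hc => by simpa [PySem.Dict.getD_counter] using hle c hc, fun k hk => ?_⟩
          have := h k ((hmemk k).mpr hk)
          rwa [hgD k] at this
        · rintro ⟨h1, h2⟩ k hk
          rw [hgD k]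
          exact h2 k ((hmemk k).mp hk)
      by_cases hperm : s.toList.Perm t.toList
      · rw [decide_eq_true hperm]
        rw [List.all_eq_true]
        intro k hk
        simpa using (hiff2.mpr hperm) k hk
      · rw [decide_eq_false hperm]
        rw [List.all_eq_false]
        have := hiff2.not.mpr hperm
        push Not at this
        obtain ⟨k, hk, hpos⟩ := this
        exact ⟨k, hk, by simpa using hpos⟩
    · rw [if_neg hle]
      have : ¬ s.toList.Perm t.toList := by
        intro hperm
        apply hle
        intro c hc
        rw [PySem.Dict.getD_counter, List.perm_iff_count.mp hperm c]
      simp [this]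
  · rw [if_pos hlen]
    have : ¬ s.toList.Perm t.toList := by
      intro hp
      apply hlen
      simp [PySem.Str.len, hp.length_eq]
    simp [this]

lemma B_eq_decide_perm (s t : String) :
    isAnagramDict_alt s t = decide (s.toList.Perm t.toList) := by
  unfold isAnagramDict_alt
  rw [Bool.eq_iff_iff, beq_iff_eq, PySem.List.sorted_id_eq_sorted_id_iff_perm,
    decide_eq_true_eq]

-- ===== VERDICT (by name: the statement is the Claim_ definition above) =====
theorem isAnagramDict_spec : Claim_equal_isAnagramDict := by
  intro s t _
  unfold Spec_isAnagramDict
  rw [A_eq_decide_perm, B_eq_decide_perm]
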